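-- pv_equiv track=rewrite | github.com/kevinkim-dev/self_study | programmers/2020kakaobline/level2_괄호변환.py | solution
-- ===== SOURCE A (Python) =====
-- def solution(p):
--
--     def check(st):
--         stack = []
--         for s in st:
--             if s == '(':
--                 stack.append(s)
--             elif not stack:
--                 return False
--             else:
--                 stack.pop()
--         return True
--
--     def divide(st):
--         if not st:
--             return ''
--         q = [0, 0]
--         for s in st:
--             if s == '(':
--                 q[0] += 1
--             else:
--                 q[1] += 1
--             if q[0] == q[1]:
--                 break
--         u, v = st[:q[0] + q[1]], st[q[0] + q[1]:]
--         if check(u):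
--             return u + divide(v)
--         if not check(u):
--             u = u[1:-1]
--             nu = ''
--             for c in u:
--                 if c == '(':
--                     nu += ')'
--                 else:
--                     nu += '('
--             return '(' + divide(v) + ')' + nu
--
--     if not check(p):
--         return divide(p)
--     return p
-- ===== SOURCE B (Python) =====
-- def _prefix_ok(st):
--     # True iff no prefix of st has more ')' than '(' (same as A's stack check)
--     depth = 0
--     for c in st:
--         depth += 1 if c == '(' else -1
--         if depth < 0:
--             return False
--     return True
--
--
-- def _segments(p):
--     # split p into chunks: each chunk is the shortest prefix with equal '(' / ')'
--     # counts (break on first equality); if counts never equalise, the whole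
--     # remainder is one chunk
--     segs = []
--     rest = p
--     while rest:
--         opens = closes = 0
--         cut = len(rest)
--         for i, c in enumerate(rest):
--             if c == '(':
--                 opens += 1
--             else:
--                 closes += 1
--             if opens == closes:
--                 cut = i + 1
--                 break
--         segs.append(rest[:cut])
--         rest = rest[cut:]
--     return segs
--
--
-- def solution(p):
--     if _prefix_ok(p):
--         return p
--     acc = ''
--     for seg in reversed(_segments(p)):
--         if _prefix_ok(seg):
--             acc = seg + acc
--         else:
--             acc = '(' + acc + ')' + ''.join(')' if c == '(' else '(' for c in seg[1:-1])
--     return acc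
-- ===== Notes on version B (the rewrite author's own statement) =====
-- stated objective: alternative
-- what changed: Replaces A's counter-based prefix check by a single depth counter and A's recursive divide (which re-splits and concatenates inside each recursive call) by an explicit iterative split of the input into balanced segments followed by one reverse fold over the segment list building the answer in an accumulator.
import Mathlib
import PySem

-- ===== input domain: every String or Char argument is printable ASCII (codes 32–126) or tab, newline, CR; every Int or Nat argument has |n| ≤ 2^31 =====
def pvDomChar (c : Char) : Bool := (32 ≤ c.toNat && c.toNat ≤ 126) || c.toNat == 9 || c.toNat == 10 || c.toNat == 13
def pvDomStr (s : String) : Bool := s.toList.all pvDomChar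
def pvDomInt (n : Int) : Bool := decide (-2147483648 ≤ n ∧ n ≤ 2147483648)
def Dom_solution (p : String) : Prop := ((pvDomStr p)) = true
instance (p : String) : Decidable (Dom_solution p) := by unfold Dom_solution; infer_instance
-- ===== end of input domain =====

-- B replaces A's recursive divide by an explicit segment split plus one reverse
-- fold with an accumulator (alternative decomposition; same cost).

-- ===== PORT A =====
-- A's check: stack of '(' chars; pop on other chars, False on pop from empty.
def checkLoopA : List Char → List Char → Bool
  | [], _ => true
  | s :: rest, stack =>
    if s = '(' then checkLoopA rest (s :: stack)
    else match stack with
      | [] => false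
      | _ :: t => checkLoopA rest t

def checkA (st : List Char) : Bool := checkLoopA st []

-- A's q-loop: counts ('(' count, other count), breaking at first equality.
def countLoopA : List Char → Nat → Nat → Nat × Nat
  | [], a, b => (a, b)
  | s :: rest, a, b =>
    let a' := if s = '(' then a + 1 else a
    let b' := if s = '(' then b else b + 1
    if a' = b' then (a', b') else countLoopA rest a' b'

-- A's nu-loop: 'nu += flipped c'.
def nuLoopA (u : List Char) : List Char :=
  u.foldl (fun acc c => acc ++ [if c = '(' then ')' else '(']) []

theorem countLoopA_sum_le : ∀ (st : List Char) (a b : Nat),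
    a + b ≤ (countLoopA st a b).1 + (countLoopA st a b).2 := by
  intro st
  induction st with
  | nil => intro a b; simp [countLoopA]
  | cons s rest ih =>
    intro a b
    simp only [countLoopA]
    split_ifs with h1 h2 h3
    · simp <;> omega
    · have := ih (a + 1) b; omega
    · simp <;> omega
    · have := ih a (b + 1); omega

theorem countLoopA_sum_lt (st : List Char) (a b : Nat) (h : st ≠ []) :
    a + b < (countLoopA st a b).1 + (countLoopA st a b).2 := by
  cases st with
  | nil => exact absurd rfl h
  | cons s rest =>
    simp only [countLoopA]
    split_ifs with h1 h2 h3
    · simp <;> omega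
    · have := countLoopA_sum_le rest (a + 1) b; omega
    · simp <;> omega
    · have := countLoopA_sum_le rest a (b + 1); omega

def divideA (st : List Char) : List Char :=
  if h : st = [] then []
  else
    let q := countLoopA st 0 0
    let n := q.1 + q.2
    let u := st.take n
    let v := st.drop n
    if checkA u then u ++ divideA v
    else
      -- u = u[1:-1], flipped into nu
      '(' :: divideA v ++ ')' :: nuLoopA ((u.drop 1).dropLast)
termination_by st.length
decreasing_by
  all_goals
    simp only [List.length_drop]
    have := countLoopA_sum_lt st 0 0 h
    have hl : 0 < st.length := List.length_pos_iff.mpr h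
    omega

def solution (p : String) : String :=
  if checkA p.toList then p else String.mk (divideA p.toList)

-- ===== PORT B =====
-- B's check: a single depth counter, False as soon as it dips below zero.
def okLoopB : List Char → Int → Bool
  | [], _ => true
  | c :: rest, d =>
    let d' := d + (if c = '(' then 1 else -1)
    if d' < 0 then false else okLoopB rest d'

def prefixOkB (st : List Char) : Bool := okLoopB st 0

-- B's inner for-loop: index of first prefix with equal counts (1-based length).
def cutLoopB : List Char → Nat → Nat → Nat → Option Nat
  | [], _, _, _ => none
  | c :: rest, i, o, cl =>
    let o' := if c = '(' then o + 1 else o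
    let cl' := if c = '(' then cl else cl + 1
    if o' = cl' then some (i + 1) else cutLoopB rest (i + 1) o' cl'

def cutB (st : List Char) : Nat := (cutLoopB st 0 0 0).getD st.length

theorem cutLoopB_gt : ∀ (st : List Char) (i o cl n : Nat),
    cutLoopB st i o cl = some n → i < n := by
  intro st
  induction st with
  | nil => intro i o cl n h; simp [cutLoopB] at h
  | cons c rest ih =>
    intro i o cl n h
    simp only [cutLoopB] at h
    split_ifs at h
    · simp at h; omega
    · have := ih _ _ _ _ h; omega
    · simp at h; omega
    · have := ih _ _ _ _ h; omega

theorem cutB_pos (st : List Char) (h : st ≠ []) : 0 < cutB st := by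
  unfold cutB
  cases hc : cutLoopB st 0 0 0 with
  | none => simpa using List.length_pos_iff.mpr h
  | some n => simpa using cutLoopB_gt st 0 0 0 n hc

def segmentsB (rest : List Char) : List (List Char) :=
  if h : rest = [] then []
  else
    let cut := cutB rest
    rest.take cut :: segmentsB (rest.drop cut)
termination_by rest.length
decreasing_by
  simp only [List.length_drop]
  have := cutB_pos rest h
  have hl : 0 < rest.length := List.length_pos_iff.mpr h
  omega

def flipB (u : List Char) : List Char :=
  u.map (fun c => if c = '(' then ')' else '(')

def stepB (acc : List Char) (seg : List Char) : List Char :=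
  if prefixOkB seg then seg ++ acc
  else '(' :: acc ++ ')' :: flipB ((seg.drop 1).dropLast)

def solution_alt (p : String) : String :=
  if prefixOkB p.toList then p
  else String.mk ((segmentsB p.toList).reverse.foldl stepB [])

-- ===== PRECONDITION & SPEC =====
def Spec_solution (p : String) (out : String) : Prop := out = solution_alt p
instance (p : String) (out : String) : Decidable (Spec_solution p out) := by unfold Spec_solution; infer_instance

-- ===== CLAIM (what is proved, stated in full; the proofs are below) =====
def Claim_equal_solution : Prop := ∀ (p : String), Dom_solution p → Spec_solution p (solution p)

-- ===== LEMMAS AND PROOFS =====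

-- A's stack-based check equals B's counter-based check (stack holds only '(').
theorem checkLoopA_eq_okLoopB : ∀ (st stack : List Char),
    checkLoopA st stack = okLoopB st (stack.length : Int) := by
  intro st
  induction st with
  | nil => intro stack; simp [checkLoopA, okLoopB]
  | cons s rest ih =>
    intro stack
    simp only [checkLoopA, okLoopB]
    by_cases hs : s = '('
    · rw [if_pos hs, if_pos hs, if_neg (by omega : ¬ ((stack.length : Int) + 1 < 0)), ih]
      congr 1
    · rw [if_neg hs, if_neg hs]
      cases stack with
      | nil => simp
      | cons hd t =>
        rw [if_neg (by simp : ¬ (((hd :: t).length : Int) + -1 < 0))]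
        show checkLoopA rest t = okLoopB rest (((hd :: t).length : Int) + -1)
        rw [ih]
        congr 1
        simp

theorem checkA_eq_prefixOkB (st : List Char) : checkA st = prefixOkB st := by
  simpa using checkLoopA_eq_okLoopB st []

-- A's count loop and B's cut loop find the same break point.
theorem countLoopA_eq_cutLoopB : ∀ (st : List Char) (i a b : Nat),
    (countLoopA st a b).1 + (countLoopA st a b).2 + i
      = a + b + (cutLoopB st i a b).getD (i + st.length) := by
  intro st
  induction st with
  | nil => intro i a b; simp [countLoopA, cutLoopB]
  | cons c rest ih =>
    intro i a b
    simp only [countLoopA, cutLoopB, List.length_cons]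
    rw [show i + (rest.length + 1) = (i + 1) + rest.length by omega]
    split_ifs with h1 h2 h3
    · simp <;> omega
    · have := ih (i + 1) (a + 1) b; omega
    · simp <;> omega
    · have := ih (i + 1) a (b + 1); omega

theorem nA_eq_cutB (st : List Char) :
    (countLoopA st 0 0).1 + (countLoopA st 0 0).2 = cutB st := by
  have := countLoopA_eq_cutLoopB st 0 0 0
  simpa [cutB] using this

-- A's character-append loop builds the map B's join builds.
theorem nuLoopA_eq_flipB (u : List Char) : nuLoopA u = flipB u := by
  have : ∀ (l acc : List Char),
      l.foldl (fun acc c => acc ++ [if c = '(' then ')' else '(']) acc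
        = acc ++ flipB l := by
    intro l
    induction l with
    | nil => intro acc; simp [flipB]
    | cons c t ih => intro acc; simp [flipB] at *; simp [ih]
  simpa [nuLoopA] using this u []

-- Main: A's recursive divide equals B's reverse fold over the segment list.
theorem divideA_eq_fold : ∀ (m : Nat) (st : List Char), st.length ≤ m →
    divideA st = (segmentsB st).foldr (fun seg acc => stepB acc seg) [] := by
  intro m
  induction m with
  | zero =>
    intro st h
    have : st = [] := List.eq_nil_of_length_eq_zero (by omega)
    subst this
    rw [divideA, segmentsB]
    simp
  | succ m ih =>
    intro st h
    by_cases hst : st = []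
    · subst hst; rw [divideA, segmentsB]; simp
    · rw [divideA, segmentsB]
      simp only [dif_neg hst]
      have hn : (countLoopA st 0 0).1 + (countLoopA st 0 0).2 = cutB st := nA_eq_cutB st
      have hpos : 0 < cutB st := cutB_pos st hst
      have hlen : (st.drop (cutB st)).length ≤ m := by
        simp only [List.length_drop]
        have : 0 < st.length := List.length_pos_iff.mpr hst
        omega
      rw [hn]
      rw [ih _ hlen]
      simp only [List.foldr_cons, stepB]
      rw [checkA_eq_prefixOkB, nuLoopA_eq_flipB]

-- ===== VERDICT (by name: the statement is the Claim_ definition above) =====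
theorem solution_spec : Claim_equal_solution := by
  intro p _
  unfold Spec_solution solution solution_alt
  rw [checkA_eq_prefixOkB]
  split
  · rfl
  · rw [divideA_eq_fold p.toList.length p.toList le_rfl, List.foldl_reverse]
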